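-- pv_equiv track=rewrite | github.com/aioaneid/table-transformer | relax/annotations.py | optimal_width_height
-- ===== SOURCE A (Python) =====
-- def optimal_width_height(image_size, n):
--     return min(
--         (
--             (
--                 abs(a * image_size[0] - b * image_size[1]),
--                 a,
--                 b,
--             )
--             for a in range(n + 1)
--             for b in range(n + 1)
--             if n <= a * b < n + min(a, b)
--         )
--     )
-- ===== SOURCE B (Python) =====
-- def optimal_width_height(image_size, n):
--     w = image_size[0]
--     h = image_size[1]
--     best = None
--     for a in range(1, n + 1):
--         # ceil(n / a): the only b that can satisfy n <= a*b < n + min(a, b)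
--         b = -(-n // a)
--         if a * b < n + min(a, b):
--             cand = (abs(a * w - b * h), a, b)
--             if best is None or cand < best:
--                 best = cand
--     return best
-- ===== Notes on version B (the rewrite author's own statement) =====
-- stated objective: faster
-- what changed: Instead of scanning all (a,b) pairs in [0,n]^2, B derives for each a the single possible b = ceil(n/a) by division (since min(a,b) <= a forces a*b in [n, n+a)), keeping a running lexicographic minimum in one pass.
import Mathlib
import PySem

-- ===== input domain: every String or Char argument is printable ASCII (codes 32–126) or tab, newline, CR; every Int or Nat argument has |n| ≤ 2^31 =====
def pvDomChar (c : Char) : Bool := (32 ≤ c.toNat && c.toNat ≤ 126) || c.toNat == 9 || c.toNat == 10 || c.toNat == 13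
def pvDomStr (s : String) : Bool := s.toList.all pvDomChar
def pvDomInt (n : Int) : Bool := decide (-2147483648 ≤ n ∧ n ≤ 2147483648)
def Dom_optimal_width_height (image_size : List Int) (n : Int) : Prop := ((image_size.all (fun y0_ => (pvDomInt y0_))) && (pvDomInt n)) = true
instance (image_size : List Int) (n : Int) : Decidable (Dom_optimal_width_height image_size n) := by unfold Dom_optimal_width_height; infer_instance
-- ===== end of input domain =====

-- B replaces A's O(n^2) scan of all (a,b) pairs by an O(n) pass computing, per a, the
-- single candidate b = ceil(n/a) by division (faster, asymptotic; measured by the check).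


-- ===== PORT A =====
-- Python's `<` on int 3-tuples: lexicographic (Mathlib's Prod `<` is pointwise, so hand-rolled)
def lexLt3 (x y : Int × Int × Int) : Bool :=
  x.1 < y.1 || (x.1 == y.1 && (x.2.1 < y.2.1 || (x.2.1 == y.2.1 && x.2.2 < y.2.2)))

-- the generator: for a in range(n+1) for b in range(n+1) if n <= a*b < n+min(a,b)
def owhInner (w h n a : Int) : List (Int × Int × Int) :=
  (PySem.List.pyRange 0 (n + 1) 1).filterMap (fun b =>
    if n ≤ a * b ∧ a * b < n + min a b then some (|a * w - b * h|, a, b) else none)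

def owhCands (w h n : Int) : List (Int × Int × Int) :=
  (PySem.List.pyRange 0 (n + 1) 1).flatMap (owhInner w h n)

-- Python min(...) over the generator: first extremal element under tuple lex order; none = ValueError
def min3step (m : Option (Int × Int × Int)) (x : Int × Int × Int) : Option (Int × Int × Int) :=
  match m with
  | none => some x
  | some m => if lexLt3 x m then some x else some m

def optimal_width_height (image_size : List Int) (n : Int) : List Int :=
  match PySem.List.pyGet? image_size 0, PySem.List.pyGet? image_size 1 with
  | some w, some h =>
    match (owhCands w h n).foldl min3step none with
    | some (d, a, b) => [d, a, b]
    | none => []          -- Python: ValueError (empty generator); excluded by Pre_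
  | _, _ => []            -- Python: IndexError; excluded by Pre_

-- ===== PORT B =====
-- `cand < best` on Python int 3-tuples: lexicographic
def tupLt (x y : Int × Int × Int) : Bool :=
  x.1 < y.1 || (x.1 == y.1 && (x.2.1 < y.2.1 || (x.2.1 == y.2.1 && x.2.2 < y.2.2)))

-- loop body: b = -(-n // a); if a*b < n + min(a,b): update running best
def owhAltStep (n w h : Int) (best : Option (Int × Int × Int)) (a : Int) : Option (Int × Int × Int) :=
  let b := -(PySem.Int.floordiv (-n) a)
  if a * b < n + min a b then
    let cand := (|a * w - b * h|, a, b)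
    if (match best with | none => true | some m => tupLt cand m) then some cand else best
  else best

-- `return best` (a 3-tuple; None only when n < 1, excluded by Pre_)
def owhAltFinish (r : Option (Int × Int × Int)) : List Int :=
  match r with
  | some t => [t.1, t.2.1, t.2.2]
  | none => []

def optimal_width_height_alt (image_size : List Int) (n : Int) : List Int :=
  match PySem.List.pyGet? image_size 0 with
  | none => []            -- IndexError; excluded by Pre_
  | some w =>
    match PySem.List.pyGet? image_size 1 with
    | none => []          -- IndexError; excluded by Pre_
    | some h => owhAltFinish ((PySem.List.pyRange 1 (n + 1) 1).foldl (owhAltStep n w h) none)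

-- ===== PRECONDITION & SPEC =====
-- Exactly where A returns: image_size needs indices 0 and 1, and for n < 1 the generator is
-- empty so Python's min raises ValueError.
def Pre_optimal_width_height (image_size : List Int) (n : Int) : Prop :=
  2 ≤ image_size.length ∧ 1 ≤ n
instance (image_size : List Int) (n : Int) : Decidable (Pre_optimal_width_height image_size n) := by unfold Pre_optimal_width_height; infer_instance

def pvWitness_optimal_width_height : List Int × Int := ([10, 7], 3)

def Spec_optimal_width_height (image_size : List Int) (n : Int) (out : List Int) : Prop := out = optimal_width_height_alt image_size n
instance (image_size : List Int) (n : Int) (out : List Int) : Decidable (Spec_optimal_width_height image_size n out) := by unfold Spec_optimal_width_height; infer_instance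

-- ===== CLAIM (what is proved, stated in full; the proofs are below) =====
def Claim_equal_optimal_width_height : Prop := ∀ (image_size : List Int) (n : Int), Dom_optimal_width_height image_size n → Pre_optimal_width_height image_size n → Spec_optimal_width_height image_size n (optimal_width_height image_size n)

-- ===== LEMMAS AND PROOFS =====

-- B's per-a candidate, as an Option
def bCand (n w h a : Int) : Option (Int × Int × Int) :=
  let b := -(PySem.Int.floordiv (-n) a)
  if a * b < n + min a b then some (|a * w - b * h|, a, b) else none

lemma step_eq (n w h : Int) (best : Option (Int × Int × Int)) (a : Int) :
    owhAltStep n w h best a =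
      match bCand n w h a with
      | none => best
      | some c => min3step best c := by
  have hlt : tupLt = lexLt3 := rfl
  unfold owhAltStep bCand min3step
  rw [hlt]
  dsimp only
  cases best <;> split_ifs <;> simp_all

lemma foldl_flatMap_toList (g : Int → Option (Int × Int × Int)) (l : List Int)
    (init : Option (Int × Int × Int)) :
    (l.flatMap (fun a => (g a).toList)).foldl min3step init
      = l.foldl (fun best a => match g a with | none => best | some c => min3step best c) init := by
  induction l generalizing init with
  | nil => rfl
  | cons a t ih =>
      rw [List.flatMap_cons, List.foldl_append, List.foldl_cons]
      cases g a <;> simp [ih]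

lemma filterMap_eq_singleton {α β : Type} (f : α → Option β) (l : List α) (b0 : α) (c : β)
    (hmem : b0 ∈ l) (hnd : l.Nodup) (hb0 : f b0 = some c)
    (hother : ∀ x ∈ l, x ≠ b0 → f x = none) :
    l.filterMap f = [c] := by
  induction l with
  | nil => cases hmem
  | cons x t ih =>
      rcases List.mem_cons.mp hmem with h | h
      · subst h
        have hrest : t.filterMap f = [] := by
          rw [List.filterMap_eq_nil_iff]
          intro y hy
          exact hother y (List.mem_cons_of_mem _ hy)
            (fun hxy => (List.nodup_cons.mp hnd).1 (hxy ▸ hy))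
        rw [List.filterMap_cons, hb0, hrest]
      · have hx : f x = none := by
          exact hother x List.mem_cons_self (fun hxb => (List.nodup_cons.mp hnd).1 (hxb ▸ h))
        rw [List.filterMap_cons, hx]
        exact ih h (List.nodup_cons.mp hnd).2
          (fun y hy hyb => hother y (List.mem_cons_of_mem _ hy) hyb)

-- uniqueness: for a ≥ 1, any b satisfying the filter equals ceil(n/a)
lemma b_unique (n a b : Int) (ha : 1 ≤ a) (h1 : n ≤ a * b) (h2 : a * b < n + min a b) :
    b = -(PySem.Int.floordiv (-n) a) := by
  set b0 := -(PySem.Int.floordiv (-n) a) with hb0def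
  have hchar : (b0 - 1) * a < n ∧ n ≤ b0 * a :=
    (PySem.Int.neg_floordiv_neg_eq_iff_of_pos (by omega)).mp hb0def.symm
  have hlt : a * b < n + a := lt_of_lt_of_le h2 (by have := min_le_left a b; omega)
  have hle1 : b ≤ b0 := by nlinarith [hchar.2]
  have hle2 : b0 ≤ b := by nlinarith [hchar.1]
  omega

lemma inner_eq (n w h a : Int) (hn : 1 ≤ n) (ha : 1 ≤ a) :
    owhInner w h n a = (bCand n w h a).toList := by
  set b0 := -(PySem.Int.floordiv (-n) a) with hb0def
  have hchar : (b0 - 1) * a < n ∧ n ≤ b0 * a :=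
    (PySem.Int.neg_floordiv_neg_eq_iff_of_pos (by omega)).mp hb0def.symm
  have hb0pos : 1 ≤ b0 := by nlinarith [hchar.1, hchar.2]
  have hb0le : b0 ≤ n := by nlinarith [hchar.1]
  unfold owhInner bCand
  rw [← hb0def]
  by_cases hc : a * b0 < n + min a b0
  · rw [if_pos hc]
    apply filterMap_eq_singleton _ _ b0
    · exact (PySem.List.mem_pyRange_one).mpr ⟨by omega, by omega⟩
    · exact PySem.List.nodup_pyRange_one 0 (n + 1)
    · rw [if_pos ⟨by nlinarith [hchar.2], hc⟩]
    · intro x _ hx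
      rw [if_neg]
      rintro ⟨h1, h2⟩
      exact hx (b_unique n a x ha h1 h2)
  · rw [if_neg hc]
    rw [Option.toList_none, List.filterMap_eq_nil_iff]
    intro x _
    rw [if_neg]
    rintro ⟨h1, h2⟩
    rw [b_unique n a x ha h1 h2] at h2
    exact hc (by rw [mul_comm] at h2 ⊢; exact h2)

lemma flatMap_congr_mem {α β : Type} (l : List α) (f g : α → List β)
    (h : ∀ x ∈ l, f x = g x) : l.flatMap f = l.flatMap g := by
  induction l with
  | nil => rfl
  | cons x t ih => simp only [List.flatMap_cons, h x (List.mem_cons_self),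
      ih (fun y hy => h y (List.mem_cons_of_mem _ hy))]

lemma cands_eq (w h n : Int) (hn : 1 ≤ n) :
    owhCands w h n = (PySem.List.pyRange 1 (n + 1) 1).flatMap (fun a => (bCand n w h a).toList) := by
  unfold owhCands
  rw [PySem.List.pyRange_one_cons (by omega : (0:Int) < n + 1), List.flatMap_cons]
  have h0 : owhInner w h n 0 = [] := by
    unfold owhInner
    rw [List.filterMap_eq_nil_iff]
    intro x _
    rw [if_neg]
    rintro ⟨h1, _⟩
    omega
  rw [h0, List.nil_append]
  have : (0 : Int) + 1 = 1 := by omega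
  rw [this]
  apply flatMap_congr_mem
  intro a hamem
  have ha : 1 ≤ a := ((PySem.List.mem_pyRange_one).mp hamem).1
  exact inner_eq n w h a hn ha

-- ===== VERDICT (by name: the statement is the Claim_ definition above) =====
theorem optimal_width_height_spec : Claim_equal_optimal_width_height := by
  intro image_size n _ hpre
  unfold Spec_optimal_width_height
  obtain ⟨hlen, hn⟩ := hpre
  match image_size, hlen with
  | w :: h :: rest, _ =>
    unfold optimal_width_height optimal_width_height_alt
    have hg0 : PySem.List.pyGet? (w :: h :: rest) 0 = some w :=
      PySem.List.pyGet?_zero_cons w (h :: rest)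
    have hg1 : PySem.List.pyGet? (w :: h :: rest) 1 = some h := by
      have := PySem.List.pyGet?_ofNat (xs := w :: h :: rest) (n := 1) (by simp)
      exact_mod_cast this
    rw [hg0, hg1]
    dsimp only
    have key : (owhCands w h n).foldl min3step none
        = (PySem.List.pyRange 1 (n + 1) 1).foldl (owhAltStep n w h) none := by
      rw [cands_eq w h n hn, foldl_flatMap_toList]
      have hf : (fun (best : Option (Int × Int × Int)) (a : Int) =>
          match bCand n w h a with | none => best | some c => min3step best c)
          = owhAltStep n w h :=
        funext fun best => funext fun a => (step_eq n w h best a).symm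
      rw [hf]
    rw [key]
    cases hF : (PySem.List.pyRange 1 (n + 1) 1).foldl (owhAltStep n w h) none with
    | none => rfl
    | some t => obtain ⟨d, a, b⟩ := t; rfl
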